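-- pv_equiv track=rewrite | github.com/mcuelenaere/advent_of_code | advent_of_code/2020/day06/part2.py | parse_answers_groups
-- ===== SOURCE A (Python) =====
-- from collections import defaultdict
-- from typing import List, Set
--
-- def parse_answers_groups(text: str) -> List[Set[str]]:
--     groups = []
--     current_group = defaultdict(int)
--     current_group_length = 0
--     for line in text.splitlines():
--         if line == "":
--             groups.append(set(answer for answer, count in current_group.items() if count == current_group_length))
--             current_group = defaultdict(int)
--             current_group_length = 0
--             continue
--
--         for answer in set(line):
--             current_group[answer] += 1
--         current_group_length += 1
--
--     if len(current_group) > 0: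
--         groups.append(set(answer for answer, count in current_group.items() if count == current_group_length))
--
--     return groups
-- ===== SOURCE B (Python) =====
-- def parse_answers_groups(text):
--     groups = []
--     current = []
--     for line in text.splitlines():
--         if line == "":
--             groups.append(set.intersection(*current) if current else set())
--             current = []
--         else:
--             current.append(set(line))
--     if current:
--         groups.append(set.intersection(*current))
--     return groups
-- ===== Notes on version B (the rewrite author's own statement) =====
-- stated objective: simpler
-- what changed: B keeps each group as a list of per-person sets and emits their direct set intersection at each flush, replacing A's defaultdict occurrence-counter plus count==group-length filter.
import Mathlib
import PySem

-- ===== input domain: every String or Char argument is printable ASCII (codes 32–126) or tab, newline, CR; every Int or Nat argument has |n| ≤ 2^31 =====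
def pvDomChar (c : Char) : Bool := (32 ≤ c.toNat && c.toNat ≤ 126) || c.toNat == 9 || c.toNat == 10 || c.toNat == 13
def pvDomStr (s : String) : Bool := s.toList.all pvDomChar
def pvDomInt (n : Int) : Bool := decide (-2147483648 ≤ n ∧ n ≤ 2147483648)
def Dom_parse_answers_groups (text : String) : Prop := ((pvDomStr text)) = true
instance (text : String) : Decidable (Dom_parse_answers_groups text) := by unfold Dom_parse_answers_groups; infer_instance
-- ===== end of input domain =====

-- B replaces A's per-group occurrence-counting dict (+ count == group-length filter) by keeping the
-- group's per-person answer sets and intersecting them at each flush: simpler, same results.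
-- Python answers are one-char strings; both ports count/intersect Chars and wrap each answer as a
-- one-char String when a group's set is emitted (a bijective recoding of the same values).

-- ===== PORT A =====
-- set(answer for answer, count in current_group.items() if count == current_group_length)
def pvGroupA (d : PySem.Dict Char Int) (n : Int) : List String :=
  PySem.Set.ofList ((d.items.filter (fun kv => kv.2 == n)).map (fun kv => String.ofList [kv.1]))

def parse_answers_groups (text : String) : List (List String) :=
  let fin := (PySem.Str.splitlines text).foldl
    (fun st line =>
      if line == "" then
        (st.1 ++ [pvGroupA st.2.1 st.2.2], PySem.Dict.empty, 0)
      else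
        (st.1,
         (PySem.Set.ofList line.toList).foldl (fun d a => d.insert a (d.getD a 0 + 1)) st.2.1,
         st.2.2 + 1))
    (([] : List (List String)), (PySem.Dict.empty : PySem.Dict Char Int), (0 : Int))
  if fin.2.1.size > 0 then fin.1 ++ [pvGroupA fin.2.1 fin.2.2] else fin.1

-- ===== PORT B =====
-- set.intersection(*current) if current else set(), wrapped to one-char strings
def pvInterB (cur : List (PySem.Set Char)) : List String :=
  match cur with
  | [] => []
  | s :: rest => (rest.foldl PySem.Set.inter s).map (fun c => String.ofList [c])

def parse_answers_groups_alt (text : String) : List (List String) :=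
  let fin := (PySem.Str.splitlines text).foldl
    (fun st line =>
      if line == "" then
        (st.1 ++ [pvInterB st.2], ([] : List (PySem.Set Char)))
      else
        (st.1, st.2 ++ [PySem.Set.ofList line.toList]))
    (([] : List (List String)), ([] : List (PySem.Set Char)))
  if fin.2.isEmpty then fin.1 else fin.1 ++ [pvInterB fin.2]

-- ===== PRECONDITION & SPEC =====
def Spec_parse_answers_groups (text : String) (out : List (List String)) : Prop := out = parse_answers_groups_alt text
instance (text : String) (out : List (List String)) : Decidable (Spec_parse_answers_groups text out) := by unfold Spec_parse_answers_groups; infer_instance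

-- ===== CLAIM (what is proved, stated in full; the proofs are below) =====
def Claim_equal_parse_answers_groups : Prop := ∀ (text : String), Dom_parse_answers_groups text → Spec_parse_answers_groups text (parse_answers_groups text)

-- ===== LEMMAS AND PROOFS =====

-- A's per-line dict update, and the dict a whole group of person-sets builds
def pvAddSet (d : PySem.Dict Char Int) (s : PySem.Set Char) : PySem.Dict Char Int :=
  s.foldl (fun d a => d.insert a (d.getD a 0 + 1)) d

def pvDict (cur : List (PySem.Set Char)) : PySem.Dict Char Int :=
  cur.foldl pvAddSet PySem.Dict.empty

-- invariant on B's `current`: sets of nonempty lines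
def pvInv (cur : List (PySem.Set Char)) : Prop := ∀ s ∈ cur, s ≠ [] ∧ s.Nodup

lemma pv_update_of_nodup_append {α : Type} [BEq α] [LawfulBEq α] (s k : List α) (h : (k ++ s).Nodup) :
    PySem.Set.update k s = k ++ s := by
  induction s generalizing k with
  | nil => simp [PySem.Set.update]
  | cons x s ih =>
    have hx : x ∉ k := by
      intro hm
      exact (List.disjoint_of_nodup_append h) hm (by simp)
    have : PySem.Set.add k x = k ++ [x] := by
      simp only [PySem.Set.add]
      simp [hx]
    simp only [PySem.Set.update, List.foldl_cons, this]
    have := ih (k := k ++ [x]) (by simpa using h)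
    simpa [PySem.Set.update] using this

lemma pv_ofList_of_nodup {α : Type} [BEq α] [LawfulBEq α] (s : List α) (h : s.Nodup) : PySem.Set.ofList s = s := by
  simpa using pv_update_of_nodup_append s [] (by simpa using h)

lemma pv_update_split (s k : List Char) :
    ∃ D, PySem.Set.update k s = k ++ D ∧ ∀ c ∈ D, c ∉ k := by
  induction s generalizing k with
  | nil => exact ⟨[], by simp [PySem.Set.update], by simp⟩
  | cons x s ih =>
    by_cases hx : x ∈ k
    · have : PySem.Set.add k x = k := by
        simp only [PySem.Set.add]
        simp [hx]
      obtain ⟨D, hD, hDk⟩ := ih (k := k)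
      exact ⟨D, by simpa [PySem.Set.update, this] using hD, hDk⟩
    · have : PySem.Set.add k x = k ++ [x] := by
        simp only [PySem.Set.add]
        simp [hx]
      obtain ⟨D, hD, hDk⟩ := ih (k := k ++ [x])
      refine ⟨x :: D, ?_, ?_⟩
      · simp only [PySem.Set.update, List.foldl_cons, this]
        simpa [PySem.Set.update] using hD
      · intro c hc
        rcases List.mem_cons.mp hc with hc | hc
        · intro hck; exact hx (hc ▸ hck)
        · intro hck; exact hDk c hc (by simp [hck])

lemma pv_foldl_update_split (rest : List (PySem.Set Char)) (k : List Char) :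
    ∃ D, rest.foldl PySem.Set.update k = k ++ D ∧ ∀ c ∈ D, c ∉ k := by
  induction rest generalizing k with
  | nil => exact ⟨[], by simp, by simp⟩
  | cons s rest ih =>
    obtain ⟨D0, hD0, hD0k⟩ := pv_update_split s k
    obtain ⟨D1, hD1, hD1k⟩ := ih (k := k ++ D0)
    refine ⟨D0 ++ D1, ?_, ?_⟩
    · simp [hD0, hD1]
    · intro c hc
      rcases List.mem_append.mp hc with hc | hc
      · exact hD0k c hc
      · intro hck; exact hD1k c hc (by simp [hck])

lemma pv_keys_pvDict (cur : List (PySem.Set Char)) (d : PySem.Dict Char Int) :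
    (cur.foldl pvAddSet d).keys = cur.foldl PySem.Set.update d.keys := by
  induction cur generalizing d with
  | nil => rfl
  | cons s cur ih =>
    simp only [List.foldl_cons]
    rw [ih]
    congr 1
    exact PySem.Dict.keys_foldl_insert s (fun d a => d.getD a 0 + 1) d

lemma pv_nodup_keys_pvDict (cur : List (PySem.Set Char)) (d : PySem.Dict Char Int)
    (h : d.keys.Nodup) : (cur.foldl pvAddSet d).keys.Nodup := by
  induction cur generalizing d with
  | nil => exact h
  | cons s cur ih =>
    exact ih _ (PySem.Dict.nodup_keys_foldl_insert s (fun d a => d.getD a 0 + 1) d h)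

lemma pv_getD_pvDict (cur : List (PySem.Set Char)) (d : PySem.Dict Char Int) (c : Char)
    (h : pvInv cur) :
    (cur.foldl pvAddSet d).getD c 0 = d.getD c 0 + (cur.countP (fun s => s.contains c) : Int) := by
  induction cur generalizing d with
  | nil => simp
  | cons s cur ih =>
    have hs := h s (by simp)
    have hstep : (pvAddSet d s).getD c 0 = d.getD c 0 + (s.count c : Int) :=
      PySem.Dict.getD_foldl_insert_add_one s d c
    have hcnt : (s.count c : Int) = (if s.contains c then 1 else 0) := by
      by_cases hm : c ∈ s
      · simp [List.contains_eq_mem, hm, List.count_eq_one_of_mem hs.2 hm]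
      · simp [List.contains_eq_mem, hm, List.count_eq_zero_of_not_mem hm]
    have hrec := ih (pvAddSet d s) (fun t ht => h t (by simp [ht]))
    simp only [List.foldl_cons, hrec, hstep, hcnt, List.countP_cons]
    by_cases hc : s.contains c
    · simp only [hc, if_true]
      push_cast
      ring
    · simp only [hc]
      push_cast
      ring

lemma pv_inter_foldl (rest : List (PySem.Set Char)) (s : List Char) :
    rest.foldl PySem.Set.inter s = s.filter (fun c => rest.all (fun t => t.contains c)) := by
  induction rest generalizing s with
  | nil => simp
  | cons t rest ih =>
    simp only [List.foldl_cons, PySem.Set.inter, ih, List.filter_filter, List.all_cons]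
    exact List.filter_congr (fun c _ => by rw [Bool.and_comm])

-- the core flush equality: A's count==length filter = B's intersection
lemma pv_flush (cur : List (PySem.Set Char)) (h : pvInv cur) :
    pvGroupA (pvDict cur) (cur.length : Int) = pvInterB cur := by
  cases cur with
  | nil => rfl
  | cons s rest =>
    have hs := h s (by simp)
    have hnodK : (pvDict (s :: rest)).keys.Nodup :=
      pv_nodup_keys_pvDict _ _ (by simp [PySem.Dict.keys_empty])
    have hkeys : (pvDict (s :: rest)).keys = rest.foldl PySem.Set.update s := by
      have := pv_keys_pvDict (s :: rest) PySem.Dict.empty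
      simp only [pvDict] at *
      rw [this]
      simp only [List.foldl_cons, PySem.Dict.keys_empty]
      congr 1
      exact pv_update_of_nodup_append s [] (by simpa using hs.2)
    obtain ⟨D, hD, hDk⟩ := pv_foldl_update_split rest s
    have hgetD : ∀ c, (pvDict (s :: rest)).getD c 0
        = ((s :: rest).countP (fun t => t.contains c) : Int) := by
      intro c
      have := pv_getD_pvDict (s :: rest) PySem.Dict.empty c h
      simpa [pvDict, PySem.Dict.getD_empty] using this
    have hitems : (pvDict (s :: rest)).items
        = (pvDict (s :: rest)).keys.map (fun k => (k, (pvDict (s :: rest)).getD k 0)) :=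
      PySem.Dict.items_eq_map_keys _ hnodK 0
    -- characterize the filter predicate
    have hq : ∀ c, ((pvDict (s :: rest)).getD c 0 == ((s :: rest).length : Int))
        = ((s :: rest).all (fun t => t.contains c)) := by
      intro c
      rw [hgetD c]
      apply Bool.coe_iff_coe.mp
      constructor
      · intro hb
        have : (s :: rest).countP (fun t => t.contains c) = (s :: rest).length := by
          exact_mod_cast (beq_iff_eq).mp hb
        simpa [List.all_eq_true] using List.countP_eq_length.mp this
      · intro hb
        have : (s :: rest).countP (fun t => t.contains c) = (s :: rest).length :=
          List.countP_eq_length.mpr (by simpa [List.all_eq_true] using hb)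
        exact (beq_iff_eq).mpr (by exact_mod_cast this)
    -- LHS as a filter over the keys
    have hLHS : (pvGroupA (pvDict (s :: rest)) ((s :: rest).length : Int))
        = PySem.Set.ofList ((((pvDict (s :: rest)).keys.filter
            (fun c => (s :: rest).all (fun t => t.contains c))).map (fun c => String.ofList [c]))) := by
      simp only [pvGroupA, hitems, List.filter_map, List.map_map]
      congr 2
      · apply List.filter_congr
        intro c _
        simpa using hq c
    rw [hLHS, hkeys, hD]
    rw [List.filter_append]
    have hDnil : D.filter (fun c => (s :: rest).all (fun t => t.contains c)) = [] := by
      apply List.filter_eq_nil_iff.mpr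
      intro c hc
      simp only [List.all_cons, Bool.and_eq_true]
      intro hcontra
      exact hDk c hc (List.mem_of_elem_eq_true hcontra.1)
    have hsfil : s.filter (fun c => (s :: rest).all (fun t => t.contains c))
        = s.filter (fun c => rest.all (fun t => t.contains c)) := by
      apply List.filter_congr
      intro c hc
      simp [List.contains_eq_mem, hc]
    rw [hDnil, List.append_nil, hsfil]
    have hnodup : ((s.filter (fun c => rest.all (fun t => t.contains c))).map
        (fun c => String.ofList [c])).Nodup := by
      apply List.Nodup.map
      · intro a b hab
        have := congrArg String.toList hab
        simpa using this
      · exact hs.2.filter _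
    rw [pv_ofList_of_nodup _ hnodup]
    simp [pvInterB, pv_inter_foldl]

lemma pv_size_pos (cur : List (PySem.Set Char)) (h : pvInv cur) :
    ((pvDict cur).size > 0) = (cur ≠ []) := by
  have hnodK : (pvDict cur).keys.Nodup := pv_nodup_keys_pvDict _ _ (by simp [PySem.Dict.keys_empty])
  have hsz : (pvDict cur).size = (pvDict cur).keys.length := by
    simp only [PySem.Dict.size, PySem.Dict.keys]
    rw [PySem.Dict.items_eq_map_keys _ hnodK (0 : Int)]
    simp [PySem.Dict.keys]
  cases cur with
  | nil =>
    have : pvDict ([] : List (PySem.Set Char)) = PySem.Dict.empty := rfl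
    simp [this, PySem.Dict.size_empty]
  | cons s rest =>
    have hs := h s (by simp)
    have hkeys : (pvDict (s :: rest)).keys = rest.foldl PySem.Set.update s := by
      have := pv_keys_pvDict (s :: rest) PySem.Dict.empty
      simp only [pvDict] at *
      rw [this]
      simp only [List.foldl_cons, PySem.Dict.keys_empty]
      congr 1
      exact pv_update_of_nodup_append s [] (by simpa using hs.2)
    obtain ⟨D, hD, -⟩ := pv_foldl_update_split rest s
    have : (pvDict (s :: rest)).keys.length > 0 := by
      rw [hkeys, hD]
      cases s with
      | nil => exact absurd rfl hs.1
      | cons a t => simp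
    simp [hsz, this]

-- the two loop bodies, named for the proofs (definitionally the ports' lambdas)
def pvStepA (st : List (List String) × PySem.Dict Char Int × Int) (line : String) :
    List (List String) × PySem.Dict Char Int × Int :=
  if line == "" then
    (st.1 ++ [pvGroupA st.2.1 st.2.2], PySem.Dict.empty, 0)
  else
    (st.1,
     (PySem.Set.ofList line.toList).foldl (fun d a => d.insert a (d.getD a 0 + 1)) st.2.1,
     st.2.2 + 1)

def pvStepB (st : List (List String) × List (PySem.Set Char)) (line : String) :
    List (List String) × List (PySem.Set Char) :=
  if line == "" then
    (st.1 ++ [pvInterB st.2], ([] : List (PySem.Set Char)))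
  else
    (st.1, st.2 ++ [PySem.Set.ofList line.toList])

-- the joint loop invariant
lemma pv_loop (ls : List String) (g : List (List String)) (cur : List (PySem.Set Char))
    (h : pvInv cur) :
    ls.foldl pvStepA (g, pvDict cur, (cur.length : Int))
      = ((ls.foldl pvStepB (g, cur)).1,
         pvDict (ls.foldl pvStepB (g, cur)).2,
         ((ls.foldl pvStepB (g, cur)).2.length : Int))
    ∧ pvInv (ls.foldl pvStepB (g, cur)).2 := by
  induction ls generalizing g cur with
  | nil => exact ⟨rfl, h⟩
  | cons line ls ih =>
    by_cases hline : line == ""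
    · have hflush := pv_flush cur h
      simp only [List.foldl_cons, pvStepA, pvStepB, hline, if_true]
      have h0 : pvDict ([] : List (PySem.Set Char)) = PySem.Dict.empty := rfl
      have := ih (g ++ [pvInterB cur]) [] (by intro s hs; simp at hs)
      simpa [hflush, h0] using this
    · simp only [List.foldl_cons, pvStepA, pvStepB, hline]
      have hne : line ≠ "" := by simpa using hline
      have hinv' : pvInv (cur ++ [PySem.Set.ofList line.toList]) := by
        intro s hs
        rcases List.mem_append.mp hs with hs | hs
        · exact h s hs
        · simp only [List.mem_singleton] at hs
          subst hs
          constructor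
          · have hnil : line.toList ≠ [] := by
              intro hnil
              exact hne (String.toList_eq_nil_iff.mp hnil)
            cases hl : line.toList with
            | nil => exact absurd hl hnil
            | cons a t => simp [pysem]
          · exact PySem.Set.nodup_ofList line.toList
      have hdict : pvDict (cur ++ [PySem.Set.ofList line.toList])
          = (PySem.Set.ofList line.toList).foldl (fun d a => d.insert a (d.getD a 0 + 1)) (pvDict cur) := by
        simp [pvDict, pvAddSet]
      have hlen : ((cur ++ [PySem.Set.ofList line.toList]).length : Int) = (cur.length : Int) + 1 := by
        simp
      have := ih g (cur ++ [PySem.Set.ofList line.toList]) hinv'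
      rw [hdict, hlen] at this
      exact this

-- ===== VERDICT (by name: the statement is the Claim_ definition above) =====
theorem parse_answers_groups_spec : Claim_equal_parse_answers_groups := by
  intro text _
  unfold Spec_parse_answers_groups parse_answers_groups parse_answers_groups_alt
  show (if ((PySem.Str.splitlines text).foldl pvStepA ([], PySem.Dict.empty, 0)).2.1.size > 0
        then ((PySem.Str.splitlines text).foldl pvStepA ([], PySem.Dict.empty, 0)).1
             ++ [pvGroupA ((PySem.Str.splitlines text).foldl pvStepA ([], PySem.Dict.empty, 0)).2.1
                          ((PySem.Str.splitlines text).foldl pvStepA ([], PySem.Dict.empty, 0)).2.2]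
        else ((PySem.Str.splitlines text).foldl pvStepA ([], PySem.Dict.empty, 0)).1)
      = (if ((PySem.Str.splitlines text).foldl pvStepB ([], [])).2.isEmpty
         then ((PySem.Str.splitlines text).foldl pvStepB ([], [])).1
         else ((PySem.Str.splitlines text).foldl pvStepB ([], [])).1
              ++ [pvInterB ((PySem.Str.splitlines text).foldl pvStepB ([], [])).2])
  have h0 : pvInv ([] : List (PySem.Set Char)) := by intro s hs; simp at hs
  obtain ⟨heq, hinv⟩ := pv_loop (PySem.Str.splitlines text) [] [] h0
  have h0d : pvDict ([] : List (PySem.Set Char)) = PySem.Dict.empty := rfl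
  rw [h0d] at heq
  simp only [List.length_nil, Nat.cast_zero] at heq
  rw [heq]
  set fin := (PySem.Str.splitlines text).foldl pvStepB ([], []) with hfin
  have hsp := pv_size_pos fin.2 hinv
  by_cases hcur : fin.2 = []
  · have hA : ¬ ((pvDict fin.2).size > 0) := by
      rw [hsp]; simp [hcur]
    simp [hcur, show pvDict ([] : List (PySem.Set Char)) = PySem.Dict.empty from rfl,
          PySem.Dict.size_empty]
  · have hA : (pvDict fin.2).size > 0 := by rw [hsp]; simpa using hcur
    simp [hA, List.isEmpty_iff, hcur, pv_flush fin.2 hinv]
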